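-- pv_equiv track=rewrite | github.com/mofeng-git/One-KVM | kvmd/apps/localhid/hid.py | __splitted_deltas
-- ===== SOURCE A (Python) =====
-- from typing import Generator
--
-- def __splitted_deltas(delta_x: int, delta_y: int) -> Generator[tuple[int, int], None, None]:
--     sign_x = (-1 if delta_x < 0 else 1)
--     sign_y = (-1 if delta_y < 0 else 1)
--     delta_x = abs(delta_x)
--     delta_y = abs(delta_y)
--     while delta_x > 0 or delta_y > 0:
--         dx = sign_x * max(min(delta_x, 127), 0)
--         dy = sign_y * max(min(delta_y, 127), 0)
--         yield (dx, dy)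
--         delta_x -= 127
--         delta_y -= 127
-- ===== SOURCE B (Python) =====
-- def _axis_chunks(d):
--     sign = -1 if d < 0 else 1
--     q, r = divmod(abs(d), 127)
--     out = [sign * 127] * q
--     if r:
--         out.append(sign * r)
--     return out
--
-- def __splitted_deltas(delta_x: int, delta_y: int):
--     xs = _axis_chunks(delta_x)
--     ys = _axis_chunks(delta_y)
--     n = max(len(xs), len(ys))
--     xs = xs + [0] * (n - len(xs))
--     ys = ys + [0] * (n - len(ys))
--     yield from zip(xs, ys)
-- ===== Notes on version B (the rewrite author's own statement) =====
-- stated objective: alternative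
-- what changed: Instead of A's single while-loop that decrements both deltas together, B builds each axis's chunk list independently in closed form via divmod (q full 127-chunks plus a remainder chunk), zero-pads the shorter list, and zips the two lists.
import Mathlib
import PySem

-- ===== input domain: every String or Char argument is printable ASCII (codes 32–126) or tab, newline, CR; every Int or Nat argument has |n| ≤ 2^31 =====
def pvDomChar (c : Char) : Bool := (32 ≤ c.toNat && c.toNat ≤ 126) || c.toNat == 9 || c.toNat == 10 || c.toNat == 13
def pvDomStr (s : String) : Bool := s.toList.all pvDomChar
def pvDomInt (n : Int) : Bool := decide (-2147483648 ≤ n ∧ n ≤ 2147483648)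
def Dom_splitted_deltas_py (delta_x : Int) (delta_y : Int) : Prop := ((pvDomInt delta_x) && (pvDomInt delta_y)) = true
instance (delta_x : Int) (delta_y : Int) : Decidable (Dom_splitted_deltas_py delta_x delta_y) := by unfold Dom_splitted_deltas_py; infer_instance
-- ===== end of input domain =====

-- B replaces A's joint while-decrement loop with per-axis closed-form chunk lists
-- (divmod + replicate), zero-padding and a zip (alternative decomposition; same cost).

-- ===== PORT A =====
-- A's while loop, recursing on the decremented absolute deltas
def splitted_deltas_loop (sign_x sign_y delta_x delta_y : Int) : List (Int × Int) :=
  if delta_x > 0 ∨ delta_y > 0 then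
    (sign_x * max (min delta_x 127) 0, sign_y * max (min delta_y 127) 0) ::
      splitted_deltas_loop sign_x sign_y (delta_x - 127) (delta_y - 127)
  else []
termination_by (max delta_x delta_y).toNat
decreasing_by omega

def splitted_deltas_py (delta_x : Int) (delta_y : Int) : List (Int × Int) :=
  splitted_deltas_loop (if delta_x < 0 then -1 else 1) (if delta_y < 0 then -1 else 1)
    |delta_x| |delta_y|

-- ===== PORT B =====
-- Source B's _axis_chunks: q full 127-chunks (divmod) plus a remainder chunk, sign applied
def axis_chunks (d : Int) : List Int :=
  let sign : Int := if d < 0 then -1 else 1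
  let q := PySem.Int.floordiv |d| 127
  let r := PySem.Int.mod |d| 127
  let out := List.replicate q.toNat (sign * 127)
  if r ≠ 0 then out ++ [sign * r] else out

def splitted_deltas_py_alt (delta_x : Int) (delta_y : Int) : List (Int × Int) :=
  let xs := axis_chunks delta_x
  let ys := axis_chunks delta_y
  let n := max xs.length ys.length
  let xs' := xs ++ List.replicate (n - xs.length) (0 : Int)
  let ys' := ys ++ List.replicate (n - ys.length) (0 : Int)
  xs'.zip ys'

-- ===== PRECONDITION & SPEC =====
def Spec_splitted_deltas_py (delta_x : Int) (delta_y : Int) (out : List (Int × Int)) : Prop := out = splitted_deltas_py_alt delta_x delta_y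
instance (delta_x : Int) (delta_y : Int) (out : List (Int × Int)) : Decidable (Spec_splitted_deltas_py delta_x delta_y out) := by unfold Spec_splitted_deltas_py; infer_instance

-- ===== CLAIM (what is proved, stated in full; the proofs are below) =====
def Claim_equal_splitted_deltas_py : Prop := ∀ (delta_x : Int) (delta_y : Int), Dom_splitted_deltas_py delta_x delta_y → Spec_splitted_deltas_py delta_x delta_y (splitted_deltas_py delta_x delta_y)

-- ===== LEMMAS AND PROOFS =====

-- proof-side view of one axis's chunk list, mirroring A's per-iteration step
def auxChunks (s a : Int) : List Int :=
  if a > 0 then (s * min a 127) :: auxChunks s (a - 127) else []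
termination_by a.toNat
decreasing_by omega

-- axis_chunks (divmod form) equals the recursive per-iteration form
lemma axis_chunks_eq_aux (d : Int) :
    axis_chunks d = auxChunks (if d < 0 then -1 else 1) |d| := by
  suffices h : ∀ (n : Nat) (s a : Int), 0 ≤ a → a.toNat ≤ n →
      (if PySem.Int.mod a 127 ≠ 0 then
        List.replicate (PySem.Int.floordiv a 127).toNat (s * 127) ++ [s * PySem.Int.mod a 127]
      else List.replicate (PySem.Int.floordiv a 127).toNat (s * 127)) = auxChunks s a by
    unfold axis_chunks
    exact h |d|.toNat _ |d| (abs_nonneg d) le_rfl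
  intro n
  induction n with
  | zero =>
    intro s a h0 hn
    have ha : a = 0 := by omega
    subst ha
    rw [auxChunks]
    simp [PySem.Int.floordiv, PySem.Int.mod]
  | succ n ih =>
    intro s a h0 hn
    rw [PySem.Int.floordiv_eq_ediv_of_pos (by norm_num), PySem.Int.mod_eq_emod_of_pos (by norm_num)]
    rw [auxChunks]
    by_cases hpos : a > 0
    · rw [if_pos hpos]
      by_cases hbig : a > 127
      · -- a > 127: first chunk is a full 127, recurse on a - 127
        have hmin : min a 127 = 127 := by omega
        have hq : (a / 127).toNat = (( (a - 127) / 127).toNat) + 1 := by omega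
        have hr : a % 127 = (a - 127) % 127 := by omega
        rw [← ih s (a - 127) (by omega) (by omega)]
        rw [PySem.Int.floordiv_eq_ediv_of_pos (by norm_num), PySem.Int.mod_eq_emod_of_pos (by norm_num)]
        rw [hmin, hq, hr, List.replicate_succ]
        split_ifs <;> simp
      · -- 0 < a ≤ 127: single chunk, recursion stops
        have hstop : auxChunks s (a - 127) = [] := by
          rw [auxChunks]; rw [if_neg (by omega)]
        rw [hstop]
        by_cases hfull : a = 127
        · subst hfull; norm_num
        · have hq : (a / 127).toNat = 0 := by omega
          have hr : a % 127 = a := by omega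
          have hr0 : a % 127 ≠ 0 := by omega
          have hmin : min a 127 = a := by omega
          simp [hq, hr, hr0, hmin]
          omega
    · rw [if_neg hpos]
      have ha : a = 0 := by omega
      subst ha
      norm_num
-- zero-padded zip of two chunk lists (proof-side view of B's padding + zip)
def zp (xs ys : List Int) : List (Int × Int) :=
  (xs ++ List.replicate (ys.length - xs.length) (0 : Int)).zip
    (ys ++ List.replicate (xs.length - ys.length) (0 : Int))

lemma alt_eq_zp (dx dy : Int) :
    splitted_deltas_py_alt dx dy = zp (axis_chunks dx) (axis_chunks dy) := by
  unfold splitted_deltas_py_alt zp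
  dsimp only
  have h1 : max (axis_chunks dx).length (axis_chunks dy).length - (axis_chunks dx).length
      = (axis_chunks dy).length - (axis_chunks dx).length := by omega
  have h2 : max (axis_chunks dx).length (axis_chunks dy).length - (axis_chunks dy).length
      = (axis_chunks dx).length - (axis_chunks dy).length := by omega
  rw [h1, h2]

lemma zp_cons_cons (x y : Int) (xs ys : List Int) :
    zp (x :: xs) (y :: ys) = (x, y) :: zp xs ys := by
  simp [zp, Nat.succ_sub_succ]

lemma zp_nil_cons (y : Int) (ys : List Int) :
    zp [] (y :: ys) = (0, y) :: zp [] ys := by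
  simp [zp, List.replicate_succ]

lemma zp_cons_nil (x : Int) (xs : List Int) :
    zp (x :: xs) [] = (x, 0) :: zp xs [] := by
  simp [zp, List.replicate_succ]

lemma zp_nil_nil : zp [] [] = [] := by simp [zp]

-- A's loop equals the zero-padded zip of the two per-axis chunk lists
lemma loop_eq_zp (sx sy : Int) : ∀ (n : Nat) (dx dy : Int), (max dx dy).toNat ≤ n →
    splitted_deltas_loop sx sy dx dy = zp (auxChunks sx dx) (auxChunks sy dy) := by
  intro n
  induction n with
  | zero =>
    intro dx dy hn
    have hx : ¬ dx > 0 := by omega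
    have hy : ¬ dy > 0 := by omega
    have hax : auxChunks sx dx = [] := by rw [auxChunks]; rw [if_neg hx]
    have hay : auxChunks sy dy = [] := by rw [auxChunks]; rw [if_neg hy]
    rw [splitted_deltas_loop, if_neg (by tauto), hax, hay, zp_nil_nil]
  | succ n ih =>
    intro dx dy hn
    rw [splitted_deltas_loop]
    by_cases hx : dx > 0 <;> by_cases hy : dy > 0
    · have hax : auxChunks sx dx = sx * min dx 127 :: auxChunks sx (dx - 127) := by
        rw [auxChunks]; rw [if_pos hx]
      have hay : auxChunks sy dy = sy * min dy 127 :: auxChunks sy (dy - 127) := by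
        rw [auxChunks]; rw [if_pos hy]
      rw [if_pos (Or.inl hx), hax, hay, zp_cons_cons, ih (dx - 127) (dy - 127) (by omega)]
      have h1 : max (min dx 127) 0 = min dx 127 := by omega
      have h2 : max (min dy 127) 0 = min dy 127 := by omega
      rw [h1, h2]
    · have hax : auxChunks sx dx = sx * min dx 127 :: auxChunks sx (dx - 127) := by
        rw [auxChunks]; rw [if_pos hx]
      have hay : auxChunks sy dy = [] := by rw [auxChunks]; rw [if_neg hy]
      have hay' : auxChunks sy (dy - 127) = [] := by rw [auxChunks]; rw [if_neg (by omega)]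
      rw [if_pos (Or.inl hx), ih (dx - 127) (dy - 127) (by omega), hay', hax, hay, zp_cons_nil]
      have h1 : max (min dx 127) 0 = min dx 127 := by omega
      have h2 : max (min dy 127) 0 = 0 := by omega
      rw [h1, h2, mul_zero]
    · have hax : auxChunks sx dx = [] := by rw [auxChunks]; rw [if_neg hx]
      have hax' : auxChunks sx (dx - 127) = [] := by rw [auxChunks]; rw [if_neg (by omega)]
      have hay : auxChunks sy dy = sy * min dy 127 :: auxChunks sy (dy - 127) := by
        rw [auxChunks]; rw [if_pos hy]
      rw [if_pos (Or.inr hy), ih (dx - 127) (dy - 127) (by omega), hax', hax, hay, zp_nil_cons]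
      have h1 : max (min dx 127) 0 = 0 := by omega
      have h2 : max (min dy 127) 0 = min dy 127 := by omega
      rw [h1, h2, mul_zero]
    · have hax : auxChunks sx dx = [] := by rw [auxChunks]; rw [if_neg hx]
      have hay : auxChunks sy dy = [] := by rw [auxChunks]; rw [if_neg hy]
      rw [if_neg (by tauto), hax, hay, zp_nil_nil]

-- ===== VERDICT (by name: the statement is the Claim_ definition above) =====
theorem splitted_deltas_py_spec : Claim_equal_splitted_deltas_py := by
  intro dx dy _
  unfold Spec_splitted_deltas_py splitted_deltas_py
  rw [alt_eq_zp, axis_chunks_eq_aux, axis_chunks_eq_aux,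
    loop_eq_zp _ _ (max |dx| |dy|).toNat _ _ le_rfl]
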